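-- pv_equiv track=rewrite | github.com/enriquesoto5515-netizen/myclass | TAREA01.py | serie_b
-- ===== SOURCE A (Python) =====
-- def serie_b(n):
--     resultado = []
--     if n >= 1:
--         resultado.append(3)
--     if n >= 2:
--         resultado.append(4)
--     for i in range(2,n):
--         siguiente = resultado[i-1] + resultado[i-2]
--         resultado.append(siguiente)
--     return resultado
-- ===== SOURCE B (Python) =====
-- def serie_b(n):
--     # Closed form per element: each element is a fixed combination of adjacent
--     # Fibonacci numbers, computed independently by fast doubling (no sequential
--     # recurrence over the result list).
--     def fd(k):
--         # returns (F(k), F(k+1)) by the fast-doubling identities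
--         if k == 0:
--             return (0, 1)
--         a, b = fd(k // 2)
--         c = a * (2 * b - a)
--         d = a * a + b * b
--         if k % 2 == 0:
--             return (c, d)
--         return (d, c + d)
--     out = []
--     for k in range(n):
--         a, b = fd(k)
--         out.append(a + 3 * b)
--     return out
-- ===== Notes on version B (the rewrite author's own statement) =====
-- stated objective: alternative
-- what changed: B computes each element independently from a closed form over adjacent Fibonacci numbers obtained by fast doubling, instead of A's sequential recurrence that indexes the previous two entries of the growing result list.
import Mathlib
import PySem

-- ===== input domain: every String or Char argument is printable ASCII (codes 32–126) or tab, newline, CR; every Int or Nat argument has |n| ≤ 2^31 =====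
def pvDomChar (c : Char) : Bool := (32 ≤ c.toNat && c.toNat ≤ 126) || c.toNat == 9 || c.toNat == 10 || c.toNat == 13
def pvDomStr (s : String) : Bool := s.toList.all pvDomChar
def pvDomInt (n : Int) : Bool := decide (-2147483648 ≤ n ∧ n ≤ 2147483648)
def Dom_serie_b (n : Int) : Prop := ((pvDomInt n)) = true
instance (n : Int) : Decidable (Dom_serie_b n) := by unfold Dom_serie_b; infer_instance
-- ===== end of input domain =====

-- B computes each element independently from a closed form over adjacent Fibonacci numbers,
-- obtained by fast doubling, instead of A's sequential recurrence (objective: alternative).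


-- ===== PORT A =====
-- Literal port: the indices i-1, i-2 are always in range in A (the list has i elements
-- at step i), so the .getD 0 default is never taken and Python never raises.
def serie_b (n : Int) : List Int :=
  let resultado : List Int := []
  let resultado := if n ≥ 1 then resultado ++ [3] else resultado
  let resultado := if n ≥ 2 then resultado ++ [4] else resultado
  (PySem.List.pyRange 2 n 1).foldl
    (fun resultado i =>
      let siguiente := (PySem.List.pyGet? resultado (i - 1)).getD 0 +
                       (PySem.List.pyGet? resultado (i - 2)).getD 0
      resultado ++ [siguiente])
    resultado

-- ===== PORT B =====
-- fast doubling: fd k = (F(k), F(k+1))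
def fd : Nat → Int × Int
  | 0 => (0, 1)
  | k + 1 =>
    let p := fd ((k + 1) / 2)
    let a := p.1
    let b := p.2
    let c := a * (2 * b - a)
    let d := a * a + b * b
    if (k + 1) % 2 == 0 then (c, d) else (d, c + d)
decreasing_by omega

def serie_b_alt (n : Int) : List Int :=
  (PySem.List.pyRange 0 n 1).foldl
    (fun out k =>
      let p := fd k.toNat
      out ++ [p.1 + 3 * p.2])
    []

-- ===== PRECONDITION & SPEC =====
def Spec_serie_b (n : Int) (out : List Int) : Prop := out = serie_b_alt n
instance (n : Int) (out : List Int) : Decidable (Spec_serie_b n out) := by unfold Spec_serie_b; infer_instance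

-- ===== CLAIM (what is proved, stated in full; the proofs are below) =====
def Claim_equal_serie_b : Prop := ∀ (n : Int), Dom_serie_b n → Spec_serie_b n (serie_b n)

-- ===== LEMMAS AND PROOFS =====

-- fast doubling computes Fibonacci
theorem fd_eq : ∀ k, fd k = ((Nat.fib k : Int), (Nat.fib (k + 1) : Int)) := by
  intro k
  induction k using Nat.strong_induction_on with
  | _ k ih =>
    match k with
    | 0 => simp [fd]
    | k + 1 =>
      rw [fd, ih ((k + 1) / 2) (by omega)]
      set m := (k + 1) / 2 with hm
      have hfle : Nat.fib m ≤ Nat.fib (m + 1) := Nat.fib_le_fib_succ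
      have h2m : Nat.fib (2 * m) = Nat.fib m * (2 * Nat.fib (m + 1) - Nat.fib m) :=
        Nat.fib_two_mul m
      have h2m1 : Nat.fib (2 * m + 1) = Nat.fib (m + 1) ^ 2 + Nat.fib m ^ 2 :=
        Nat.fib_two_mul_add_one m
      have h2m2 : Nat.fib (2 * m + 2) = Nat.fib (2 * m) + Nat.fib (2 * m + 1) :=
        Nat.fib_add_two
      by_cases he : (k + 1) % 2 = 0
      · have hk : k + 1 = 2 * m := by omega
        simp only [he, beq_self_eq_true, if_pos]
        rw [hk, h2m1, h2m]
        simp only [Prod.mk.injEq]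
        refine ⟨?_, ?_⟩
        · have hle : Nat.fib m * Nat.fib m ≤ Nat.fib m * (2 * Nat.fib (m + 1)) := by
            nlinarith [hfle]
          rw [Nat.mul_sub]
          push_cast [Int.natCast_sub hle]
          ring
        · push_cast; ring
      · have hk : k + 1 = 2 * m + 1 := by omega
        rw [if_neg (by simpa using he), hk, h2m1, h2m2, h2m, h2m1]
        simp only [Prod.mk.injEq]
        have hsub : Nat.fib m * (2 * Nat.fib (m + 1) - Nat.fib m)
            = Nat.fib m * 2 * Nat.fib (m + 1) - Nat.fib m * Nat.fib m := by
          rw [Nat.mul_sub]; ring_nf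
        refine ⟨?_, ?_⟩
        · push_cast; ring
        · rw [hsub]
          have hle : Nat.fib m * Nat.fib m ≤ Nat.fib m * 2 * Nat.fib (m + 1) := by
            nlinarith [hfle]
          push_cast [Int.natCast_sub hle]
          ring

-- the k-th element of the series
def aseq (k : Nat) : Int := (Nat.fib k : Int) + 3 * (Nat.fib (k + 1) : Int)

theorem aseq_rec (j : Nat) : aseq j + aseq (j + 1) = aseq (j + 2) := by
  simp [aseq, Nat.fib_add_two]
  push_cast
  ring

-- recurrence form of the tail of A's list, used only by the proofs
def serieTailA : Nat → Int → Int → List Int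
  | 0, _, _ => []
  | k + 1, prev, cur => (prev + cur) :: serieTailA k cur (prev + cur)

-- the tail recurrence is aseq along a range
theorem serieTailA_eq (k : Nat) : ∀ j, serieTailA k (aseq j) (aseq (j + 1)) = (List.range' (j + 2) k).map aseq := by
  induction k with
  | zero => intro j; simp [serieTailA]
  | succ k ih =>
    intro j
    rw [serieTailA, aseq_rec j, List.range'_succ, List.map_cons]
    have := ih (j + 1)
    rw [show j + 1 + 1 = j + 2 from rfl] at this
    rw [show j + 1 + 2 = j + 2 + 1 from rfl] at this
    rw [this]

-- folding appends is mapping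
theorem foldl_append_map {α β : Type} (f : α → β) : ∀ (xs : List α) (init : List β),
    xs.foldl (fun acc k => acc ++ [f k]) init = init ++ xs.map f := by
  intro xs
  induction xs with
  | nil => simp
  | cons x xs ih => intro init; simp [ih]

-- B's port produces aseq along range
theorem serie_b_alt_eq (n : Int) : serie_b_alt n = (List.range n.toNat).map aseq := by
  unfold serie_b_alt
  rw [PySem.List.pyRange_one]
  simp only [zero_add, Int.sub_zero]
  rw [foldl_append_map]
  simp only [List.nil_append, List.map_map]
  apply List.map_congr_left
  intro k hk
  simp [fd_eq, aseq]

-- the loop body of A's port, named for the lemmas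
def stepA (resultado : List Int) (i : Int) : List Int :=
  resultado ++ [(PySem.List.pyGet? resultado (i - 1)).getD 0 +
                (PySem.List.pyGet? resultado (i - 2)).getD 0]

-- loop invariant for A: the accumulator ends with [p, c] and the next index equals its length
theorem foldl_stepA_eq (k : Nat) : ∀ (l : List Int) (p c : Int),
    (PySem.List.pyRange ((l.length : Int) + 2) ((l.length : Int) + 2 + k) 1).foldl stepA (l ++ [p, c])
      = l ++ [p, c] ++ serieTailA k p c := by
  induction k with
  | zero =>
    intro l p c
    rw [PySem.List.pyRange_one_eq_nil (by omega)]
    simp [serieTailA]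
  | succ k ih =>
    intro l p c
    rw [PySem.List.pyRange_one_cons (by omega)]
    simp only [List.foldl_cons]
    have h1 : stepA (l ++ [p, c]) ((l.length : Int) + 2) = (l ++ [p]) ++ [c, p + c] := by
      have hc : PySem.List.pyGet? (l ++ [p, c]) ((l.length : Int) + 2 - 1) = some c := by
        have : ((l.length : Int) + 2 - 1) = ((l ++ [p]).length : Int) := by simp; omega
        rw [this]
        have := PySem.List.pyGet?_append_length (pre := l ++ [p]) (y := c) (ys := ([] : List Int))
        simpa using this
      have hp : PySem.List.pyGet? (l ++ [p, c]) ((l.length : Int) + 2 - 2) = some p := by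
        have : ((l.length : Int) + 2 - 2) = ((l.length : Int)) := by omega
        rw [this]
        have := PySem.List.pyGet?_append_length (pre := l) (y := p) (ys := [c])
        simpa using this
      simp [stepA, hc]
      ring
    rw [h1]
    have h2 : ((l.length : Int) + 2 + 1) = (((l ++ [p]).length : Int) + 2) := by simp; omega
    have h3 : ((l.length : Int) + 2 + (k + 1 : Nat)) = (((l ++ [p]).length : Int) + 2 + k) := by
      simp; push_cast; omega
    rw [h2, h3, ih (l ++ [p]) c (p + c)]
    simp [serieTailA]

-- ===== VERDICT (by name: the statement is the Claim_ definition above) =====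
theorem serie_b_spec : Claim_equal_serie_b := by
  intro n _
  show serie_b n = serie_b_alt n
  rw [serie_b_alt_eq]
  unfold serie_b
  dsimp only
  by_cases h1 : n < 1
  · rw [if_neg (show ¬ n ≥ 1 by omega), if_neg (show ¬ n ≥ 2 by omega),
        PySem.List.pyRange_one_eq_nil (by omega)]
    simp [show n.toNat = 0 by omega]
  · by_cases h2 : n = 1
    · subst h2
      rw [if_pos (show (1:Int) ≥ 1 by norm_num), if_neg (show ¬ (1:Int) ≥ 2 by norm_num),
          PySem.List.pyRange_one_eq_nil (by norm_num)]
      simp [aseq]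
    · rw [if_pos (show n ≥ 1 by omega), if_pos (show n ≥ 2 by omega)]
      have h := foldl_stepA_eq (n - 2).toNat [] 3 4
      simp only [List.nil_append, List.length_nil, Int.natCast_zero, zero_add] at h
      rw [show (2 + (((n - 2).toNat : Int))) = n by omega] at h
      have hfold : (PySem.List.pyRange 2 n 1).foldl
          (fun resultado i => resultado ++ [(PySem.List.pyGet? resultado (i - 1)).getD 0 +
            (PySem.List.pyGet? resultado (i - 2)).getD 0]) [3, 4]
          = [3, 4] ++ serieTailA (n - 2).toNat 3 4 := h
      have e : (([] : List Int) ++ [3] ++ [4]) = [3, 4] := rfl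
      rw [e, hfold]
      have h3 : (3 : Int) = aseq 0 := by simp [aseq]
      have h4 : (4 : Int) = aseq 1 := by simp [aseq]
      have hn : n.toNat = (n - 2).toNat + 2 := by omega
      rw [h3, h4, serieTailA_eq, hn, List.range_eq_range',
          show (n - 2).toNat + 2 = 2 + (n - 2).toNat by omega,
          ← show List.range' 0 2 1 ++ List.range' 2 ((n - 2).toNat) 1 = List.range' 0 (2 + (n - 2).toNat) 1
             by simpa using List.range'_append (s := 0) (m := 2) (n := (n - 2).toNat) (step := 1)]
      simp [List.range', aseq]
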